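-- pv_equiv track=rewrite | github.com/slidracoon72/leetcode | CountGoodTripletsInAnArray.py | goodTriplets
-- ===== SOURCE A (Python) =====
-- from typing import List
--
-- def goodTriplets(nums1: List[int], nums2: List[int]) -> int:
--     n = len(nums1)
--     trip1, trip2 = set(), set()
--     for i in range(n - 2):
--         for j in range(i + 1, n - 1):
--             for k in range(j + 1, n):
--                 trip1.add((nums1[i], nums1[j], nums1[k]))
--                 trip2.add((nums2[i], nums2[j], nums2[k]))
--
--     # res = 0
--     # for t in trip1:
--     #     if t in trip2:
--     #         res += 1
--     # return res
--     return len(trip1 & trip2)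
-- ===== SOURCE B (Python) =====
-- from typing import List
--
--
-- def _triples(xs: List[int]) -> set:
--     # one left-to-right pass: subsequences of length 1 / 2 / 3 seen so far
--     singles, pairs, triples = set(), set(), set()
--     for x in xs:
--         triples |= {(a, b, x) for (a, b) in pairs}
--         pairs |= {(a, x) for a in singles}
--         singles.add(x)
--     return triples
--
--
-- def goodTriplets(nums1: List[int], nums2: List[int]) -> int:
--     n = len(nums1)
--     return len(_triples(nums1) & _triples(nums2[:n]))
-- ===== Notes on version B (the rewrite author's own statement) =====
-- stated objective: alternative
-- what changed: replaces the triple nested index loop that enumerates all (i,j,k) with a single left-to-right pass that maintains the sets of distinct length-1, length-2 and length-3 subsequences seen so far, extending stored pairs by the current element.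
import Mathlib
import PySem

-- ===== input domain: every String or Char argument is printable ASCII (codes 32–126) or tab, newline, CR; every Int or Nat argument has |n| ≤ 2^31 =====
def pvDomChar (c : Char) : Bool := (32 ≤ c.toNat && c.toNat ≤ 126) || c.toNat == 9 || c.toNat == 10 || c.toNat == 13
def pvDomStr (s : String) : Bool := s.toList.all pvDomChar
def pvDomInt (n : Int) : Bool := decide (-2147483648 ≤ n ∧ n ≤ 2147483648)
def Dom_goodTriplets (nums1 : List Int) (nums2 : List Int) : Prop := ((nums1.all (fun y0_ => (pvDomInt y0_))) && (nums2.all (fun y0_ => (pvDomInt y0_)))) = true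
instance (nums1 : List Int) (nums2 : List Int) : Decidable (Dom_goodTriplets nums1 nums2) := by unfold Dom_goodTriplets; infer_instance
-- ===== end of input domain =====

-- B replaces the triple nested index loop with one left-to-right pass maintaining the
-- distinct length-1/2/3 subsequence sets seen so far (alternative decomposition, same result).


-- ===== PORT A =====
def goodTriplets (nums1 : List Int) (nums2 : List Int) : Int :=
  let n : Int := (nums1.length : Int)
  let st :=
    (PySem.List.pyRange 0 (n - 2) 1).foldl
      (fun (st : PySem.Set (Int × Int × Int) × PySem.Set (Int × Int × Int)) i =>
        (PySem.List.pyRange (i + 1) (n - 1) 1).foldl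
          (fun st j =>
            (PySem.List.pyRange (j + 1) n 1).foldl
              (fun st k =>
                (st.1.add (PySem.List.pyGetD nums1 i 0, PySem.List.pyGetD nums1 j 0, PySem.List.pyGetD nums1 k 0),
                 st.2.add (PySem.List.pyGetD nums2 i 0, PySem.List.pyGetD nums2 j 0, PySem.List.pyGetD nums2 k 0)))
              st)
          st)
      (PySem.Set.empty, PySem.Set.empty)
  PySem.Set.len (st.1.inter st.2)

-- ===== PORT B =====
-- one loop step of _triples: extend stored pairs by x, stored singles by x, record x
def pvTriplesStep (st : PySem.Set Int × PySem.Set (Int × Int) × PySem.Set (Int × Int × Int)) (x : Int) :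
    PySem.Set Int × PySem.Set (Int × Int) × PySem.Set (Int × Int × Int) :=
  (st.1.add x,
   st.2.1.update (st.1.map (fun a => (a, x))),
   st.2.2.update (st.2.1.map (fun p => (p.1, p.2, x))))

def pvTriples (xs : List Int) : PySem.Set (Int × Int × Int) :=
  (xs.foldl pvTriplesStep (PySem.Set.empty, PySem.Set.empty, PySem.Set.empty)).2.2

def goodTriplets_alt (nums1 : List Int) (nums2 : List Int) : Int :=
  let n : Int := (nums1.length : Int)
  PySem.Set.len ((pvTriples nums1).inter (pvTriples (PySem.List.slice nums2 none (some n))))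

-- ===== PRECONDITION & SPEC =====
-- Pre_ excludes exactly the inputs where A raises IndexError: len(nums2) < len(nums1) with len(nums1) ≥ 3.
def Pre_goodTriplets (nums1 : List Int) (nums2 : List Int) : Prop :=
  nums1.length ≤ nums2.length ∨ nums1.length < 3
instance (nums1 : List Int) (nums2 : List Int) : Decidable (Pre_goodTriplets nums1 nums2) := by
  unfold Pre_goodTriplets; infer_instance
def pvWitness_goodTriplets : List Int × List Int := ([1, 0, 2], [2, 0, 1])

def Spec_goodTriplets (nums1 : List Int) (nums2 : List Int) (out : Int) : Prop := out = goodTriplets_alt nums1 nums2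
instance (nums1 : List Int) (nums2 : List Int) (out : Int) : Decidable (Spec_goodTriplets nums1 nums2 out) := by unfold Spec_goodTriplets; infer_instance

-- ===== CLAIM (what is proved, stated in full; the proofs are below) =====
def Claim_equal_goodTriplets : Prop := ∀ (nums1 : List Int) (nums2 : List Int), Dom_goodTriplets nums1 nums2 → Pre_goodTriplets nums1 nums2 → Spec_goodTriplets nums1 nums2 (goodTriplets nums1 nums2)

-- ===== LEMMAS AND PROOFS =====

-- generic membership through a foldl whose step adds elements described by P
theorem pv_mem_foldl_gen {α β : Type} (step : List α → β → List α) (P : β → α → Prop)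
    (h : ∀ s b y, y ∈ step s b ↔ y ∈ s ∨ P b y) :
    ∀ (l : List β) (s : List α) (y : α), y ∈ l.foldl step s ↔ y ∈ s ∨ ∃ b ∈ l, P b y := by
  intro l
  induction l with
  | nil => simp
  | cons b l ih =>
    intro s y
    simp only [List.foldl_cons, ih, h, List.mem_cons]
    constructor
    · rintro ((hs | hp) | ⟨c, hc, hp⟩)
      · exact Or.inl hs
      · exact Or.inr ⟨b, Or.inl rfl, hp⟩
      · exact Or.inr ⟨c, Or.inr hc, hp⟩
    · rintro (hs | ⟨c, (rfl | hc), hp⟩)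
      · exact Or.inl (Or.inl hs)
      · exact Or.inl (Or.inr hp)
      · exact Or.inr ⟨c, hc, hp⟩

-- generic Nodup preservation through a foldl
theorem pv_nodup_foldl_gen {α β : Type} (step : List α → β → List α)
    (h : ∀ s b, s.Nodup → (step s b).Nodup) :
    ∀ (l : List β) (s : List α), s.Nodup → (l.foldl step s).Nodup := by
  intro l
  induction l with
  | nil => intro s hs; exact hs
  | cons b l ih => intro s hs; exact ih _ (h s b hs)

-- membership in A's triple-nested index loop
theorem pv_memA (n : Int) (g : Int → Int → Int → (Int × Int × Int)) (y : Int × Int × Int) :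
    y ∈ (PySem.List.pyRange 0 (n - 2) 1).foldl
        (fun (s : PySem.Set (Int × Int × Int)) i =>
          (PySem.List.pyRange (i + 1) (n - 1) 1).foldl
            (fun s j =>
              (PySem.List.pyRange (j + 1) n 1).foldl (fun s k => s.add (g i j k)) s)
            s)
        PySem.Set.empty
      ↔ ∃ i ∈ PySem.List.pyRange 0 (n - 2) 1, ∃ j ∈ PySem.List.pyRange (i + 1) (n - 1) 1,
          ∃ k ∈ PySem.List.pyRange (j + 1) n 1, y = g i j k := by
  have hk : ∀ i j, ∀ (s : PySem.Set (Int × Int × Int)) y,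
      y ∈ (PySem.List.pyRange (j + 1) n 1).foldl (fun s k => PySem.Set.add s (g i j k)) s ↔
        y ∈ s ∨ ∃ k ∈ PySem.List.pyRange (j + 1) n 1, y = g i j k := by
    intro i j s y
    exact pv_mem_foldl_gen _ (fun k y => y = g i j k) (fun s k y => PySem.Set.mem_add s (g i j k) y) _ s y
  have hj : ∀ i, ∀ (s : PySem.Set (Int × Int × Int)) y,
      y ∈ (PySem.List.pyRange (i + 1) (n - 1) 1).foldl
          (fun s j => (PySem.List.pyRange (j + 1) n 1).foldl (fun s k => PySem.Set.add s (g i j k)) s) s ↔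
        y ∈ s ∨ ∃ j ∈ PySem.List.pyRange (i + 1) (n - 1) 1, ∃ k ∈ PySem.List.pyRange (j + 1) n 1, y = g i j k := by
    intro i s y
    exact pv_mem_foldl_gen _ (fun j y => ∃ k ∈ PySem.List.pyRange (j + 1) n 1, y = g i j k) (fun s j y => hk i j s y) _ s y
  have := pv_mem_foldl_gen
      (fun (s : PySem.Set (Int × Int × Int)) i =>
        (PySem.List.pyRange (i + 1) (n - 1) 1).foldl
          (fun s j => (PySem.List.pyRange (j + 1) n 1).foldl (fun s k => PySem.Set.add s (g i j k)) s) s)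
      (fun i y => ∃ j ∈ PySem.List.pyRange (i + 1) (n - 1) 1, ∃ k ∈ PySem.List.pyRange (j + 1) n 1, y = g i j k)
      (fun s i y => hj i s y) (PySem.List.pyRange 0 (n - 2) 1) PySem.Set.empty y
  simpa [PySem.Set.empty] using this

-- the index triple view versus the 3-element-sublist view of a prefix
theorem pv_idx_iff_sublist (xs : List Int) (n : Int) (hn : n ≤ (xs.length : Int))
    (x y z : Int) :
    (∃ i ∈ PySem.List.pyRange 0 (n - 2) 1, ∃ j ∈ PySem.List.pyRange (i + 1) (n - 1) 1,
        ∃ k ∈ PySem.List.pyRange (j + 1) n 1,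
          (x, y, z) = (PySem.List.pyGetD xs i 0, PySem.List.pyGetD xs j 0, PySem.List.pyGetD xs k 0))
      ↔ List.Sublist [x, y, z] (xs.take n.toNat) := by
  have hlen : (xs.take n.toNat).length = n.toNat := by
    simp [List.length_take]; omega
  constructor
  · rintro ⟨i, hi, j, hj, k, hk, heq⟩
    rw [PySem.List.mem_pyRange_one] at hi hj hk
    have hix : i < (xs.length : Int) := by omega
    have hjx : j < (xs.length : Int) := by omega
    have hkx : k < (xs.length : Int) := by omega
    have h0j : (0:Int) ≤ j := by omega
    have h0k : (0:Int) ≤ k := by omega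
    rw [PySem.List.pyGetD_eq_getElem xs 0 hi.1 hix, PySem.List.pyGetD_eq_getElem xs 0 h0j hjx,
      PySem.List.pyGetD_eq_getElem xs 0 h0k hkx, Prod.mk.injEq, Prod.mk.injEq] at heq
    obtain ⟨hx, hy, hz⟩ := heq
    have ha : i.toNat < (xs.take n.toNat).length := by omega
    have hb : j.toNat < (xs.take n.toNat).length := by omega
    have hc : k.toNat < (xs.take n.toNat).length := by omega
    have hsub := List.map_getElem_sublist (l := xs.take n.toNat)
      (is := [⟨i.toNat, ha⟩, ⟨j.toNat, hb⟩, ⟨k.toNat, hc⟩]) (by simp; omega)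
    simpa [List.getElem_take, ← hx, ← hy, ← hz] using hsub
  · intro hsub
    obtain ⟨is, hmap, hpw⟩ := List.sublist_eq_map_getElem hsub
    match is, hmap with
    | [a, b, c], hmap =>
      simp only [List.map_cons, List.map_nil, List.cons.injEq, and_true] at hmap
      obtain ⟨hx, hy, hz⟩ := hmap
      simp only [List.pairwise_cons, List.mem_cons] at hpw
      have hab : (a : Nat) < b := hpw.1 b (by simp)
      have hbc : (b : Nat) < c := hpw.2.1 c (by simp)
      have hcl : (c : Nat) < (xs.take n.toNat).length := c.isLt
      refine ⟨(a : Nat), ?_, (b : Nat), ?_, (c : Nat), ?_, ?_⟩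
      · rw [PySem.List.mem_pyRange_one]; omega
      · rw [PySem.List.mem_pyRange_one]; omega
      · rw [PySem.List.mem_pyRange_one]; omega
      · have hax : ((a : Nat) : Int) < (xs.length : Int) := by omega
        have hbx : ((b : Nat) : Int) < (xs.length : Int) := by omega
        have hcx : ((c : Nat) : Int) < (xs.length : Int) := by omega
        rw [PySem.List.pyGetD_eq_getElem xs 0 (by omega) hax,
          PySem.List.pyGetD_eq_getElem xs 0 (by omega) hbx,
          PySem.List.pyGetD_eq_getElem xs 0 (by omega) hcx]
        simp only [Int.toNat_natCast]
        rw [hx, hy, hz]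
        simp [List.getElem_take]

-- B's one-pass fold: full characterisation of the three components
theorem pv_fold_char (xs : List Int) :
    ∀ (s : PySem.Set Int × PySem.Set (Int × Int) × PySem.Set (Int × Int × Int)),
    (∀ v, v ∈ (xs.foldl pvTriplesStep s).1 ↔ v ∈ s.1 ∨ v ∈ xs) ∧
    (∀ p : Int × Int, p ∈ (xs.foldl pvTriplesStep s).2.1 ↔
        p ∈ s.2.1 ∨ (∃ a ∈ s.1, ∃ b ∈ xs, p = (a, b)) ∨ (∃ b c, List.Sublist [b, c] xs ∧ p = (b, c))) ∧
    (∀ t : Int × Int × Int, t ∈ (xs.foldl pvTriplesStep s).2.2 ↔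
        t ∈ s.2.2 ∨ (∃ q ∈ s.2.1, ∃ c ∈ xs, t = (q.1, q.2, c)) ∨
          (∃ a ∈ s.1, ∃ b c, List.Sublist [b, c] xs ∧ t = (a, b, c)) ∨
          (∃ a b c, List.Sublist [a, b, c] xs ∧ t = (a, b, c))) := by
  induction xs with
  | nil => intro s; refine ⟨by simp, by simp, by simp⟩
  | cons x xs ih =>
    intro s
    have hs1 : ∀ v, v ∈ (pvTriplesStep s x).1 ↔ v ∈ s.1 ∨ v = x := by
      intro v; simp [pvTriplesStep, PySem.Set.mem_add]
    have hs2 : ∀ q : Int × Int, q ∈ (pvTriplesStep s x).2.1 ↔ q ∈ s.2.1 ∨ ∃ a ∈ s.1, q = (a, x) := by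
      intro q; simp [pvTriplesStep, PySem.Set.mem_update, eq_comm]
    have hs3 : ∀ t : Int × Int × Int, t ∈ (pvTriplesStep s x).2.2 ↔ t ∈ s.2.2 ∨ ∃ q ∈ s.2.1, t = (q.1, q.2, x) := by
      intro t; simp [pvTriplesStep, PySem.Set.mem_update, eq_comm]
    obtain ⟨ih1, ih2, ih3⟩ := ih (pvTriplesStep s x)
    refine ⟨?_, ?_, ?_⟩
    · intro v
      rw [List.foldl_cons, ih1 v, hs1 v, List.mem_cons]
      tauto
    · intro p
      rw [List.foldl_cons, ih2 p]
      simp only [hs1, hs2, List.mem_cons, List.sublist_cons_iff,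
        List.cons.injEq]
      aesop
    · intro t
      rw [List.foldl_cons, ih3 t]
      simp only [hs1, hs2, hs3, List.mem_cons, List.sublist_cons_iff,
        List.cons.injEq]
      aesop

theorem pv_mem_pvTriples (xs : List Int) (t : Int × Int × Int) :
    t ∈ pvTriples xs ↔ List.Sublist [t.1, t.2.1, t.2.2] xs := by
  obtain ⟨x, y, z⟩ := t
  have h := (pv_fold_char xs (PySem.Set.empty, PySem.Set.empty, PySem.Set.empty)).2.2 (x, y, z)
  unfold pvTriples
  rw [h]
  simp [PySem.Set.empty, Prod.ext_iff]

theorem pv_fold_nodup (xs : List Int) :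
    ∀ (s : PySem.Set Int × PySem.Set (Int × Int) × PySem.Set (Int × Int × Int)),
    s.1.Nodup → s.2.1.Nodup → s.2.2.Nodup →
    (xs.foldl pvTriplesStep s).1.Nodup ∧ (xs.foldl pvTriplesStep s).2.1.Nodup ∧
      (xs.foldl pvTriplesStep s).2.2.Nodup := by
  induction xs with
  | nil => intro s h1 h2 h3; exact ⟨h1, h2, h3⟩
  | cons x xs ih =>
    intro s h1 h2 h3
    exact ih (pvTriplesStep s x) (PySem.Set.nodup_add _ _ h1)
      (PySem.Set.nodup_update _ _ h2) (PySem.Set.nodup_update _ _ h3)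

theorem pv_nodup_pvTriples (xs : List Int) : (pvTriples xs).Nodup :=
  (pv_fold_nodup xs (PySem.Set.empty, PySem.Set.empty, PySem.Set.empty)
    (by simp [PySem.Set.empty]) (by simp [PySem.Set.empty]) (by simp [PySem.Set.empty])).2.2

-- equal length of intersections of membership-equal nodup sets
theorem pv_len_inter_congr {α : Type} [BEq α] [LawfulBEq α]
    (s1 s2 t1 t2 : PySem.Set α) (hs1 : s1.Nodup) (ht1 : t1.Nodup)
    (h1 : ∀ y, y ∈ s1 ↔ y ∈ t1) (h2 : ∀ y, y ∈ s2 ↔ y ∈ t2) :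
    PySem.Set.len (s1.inter s2) = PySem.Set.len (t1.inter t2) := by
  have hperm : (s1.inter s2).Perm (t1.inter t2) := by
    rw [List.perm_ext_iff_of_nodup (PySem.Set.nodup_inter s1 s2 hs1) (PySem.Set.nodup_inter t1 t2 ht1)]
    intro a
    simp only [PySem.Set.mem_inter, h1, h2]
  simp [PySem.Set.len, hperm.length_eq]

theorem pv_foldl_prod_split {β σ₁ σ₂ : Type} (f : σ₁ → β → σ₁) (g : σ₂ → β → σ₂)
    (l : List β) (p : σ₁ × σ₂) :
    l.foldl (fun s e => (f s.1 e, g s.2 e)) p = (l.foldl f p.1, l.foldl g p.2) := by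
  cases p; exact PySem.List.foldl_prod_mk f g l _ _

theorem pv_splitA (nums1 nums2 : List Int) (n : Int) :
    (PySem.List.pyRange 0 (n - 2) 1).foldl
      (fun (st : PySem.Set (Int × Int × Int) × PySem.Set (Int × Int × Int)) i =>
        (PySem.List.pyRange (i + 1) (n - 1) 1).foldl
          (fun st j =>
            (PySem.List.pyRange (j + 1) n 1).foldl
              (fun st k =>
                (st.1.add (PySem.List.pyGetD nums1 i 0, PySem.List.pyGetD nums1 j 0, PySem.List.pyGetD nums1 k 0),
                 st.2.add (PySem.List.pyGetD nums2 i 0, PySem.List.pyGetD nums2 j 0, PySem.List.pyGetD nums2 k 0)))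
              st)
          st)
      (PySem.Set.empty, PySem.Set.empty)
    = ((PySem.List.pyRange 0 (n - 2) 1).foldl
        (fun (s : PySem.Set (Int × Int × Int)) i =>
          (PySem.List.pyRange (i + 1) (n - 1) 1).foldl
            (fun s j => (PySem.List.pyRange (j + 1) n 1).foldl
              (fun s k => s.add (PySem.List.pyGetD nums1 i 0, PySem.List.pyGetD nums1 j 0, PySem.List.pyGetD nums1 k 0)) s) s)
        PySem.Set.empty,
       (PySem.List.pyRange 0 (n - 2) 1).foldl
        (fun (s : PySem.Set (Int × Int × Int)) i =>
          (PySem.List.pyRange (i + 1) (n - 1) 1).foldl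
            (fun s j => (PySem.List.pyRange (j + 1) n 1).foldl
              (fun s k => s.add (PySem.List.pyGetD nums2 i 0, PySem.List.pyGetD nums2 j 0, PySem.List.pyGetD nums2 k 0)) s) s)
        PySem.Set.empty) := by
  have hmid : ∀ (i : Int) (st : PySem.Set (Int × Int × Int) × PySem.Set (Int × Int × Int)),
      (PySem.List.pyRange (i + 1) (n - 1) 1).foldl
        (fun st j =>
          (PySem.List.pyRange (j + 1) n 1).foldl
            (fun st k =>
              (st.1.add (PySem.List.pyGetD nums1 i 0, PySem.List.pyGetD nums1 j 0, PySem.List.pyGetD nums1 k 0),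
               st.2.add (PySem.List.pyGetD nums2 i 0, PySem.List.pyGetD nums2 j 0, PySem.List.pyGetD nums2 k 0)))
            st)
        st
      = ((PySem.List.pyRange (i + 1) (n - 1) 1).foldl
          (fun s j => (PySem.List.pyRange (j + 1) n 1).foldl
            (fun s k => s.add (PySem.List.pyGetD nums1 i 0, PySem.List.pyGetD nums1 j 0, PySem.List.pyGetD nums1 k 0)) s) st.1,
         (PySem.List.pyRange (i + 1) (n - 1) 1).foldl
          (fun s j => (PySem.List.pyRange (j + 1) n 1).foldl
            (fun s k => s.add (PySem.List.pyGetD nums2 i 0, PySem.List.pyGetD nums2 j 0, PySem.List.pyGetD nums2 k 0)) s) st.2) := by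
    intro i st
    have hfun : (fun (st : PySem.Set (Int × Int × Int) × PySem.Set (Int × Int × Int)) (j : Int) =>
        (PySem.List.pyRange (j + 1) n 1).foldl
          (fun st k =>
            (st.1.add (PySem.List.pyGetD nums1 i 0, PySem.List.pyGetD nums1 j 0, PySem.List.pyGetD nums1 k 0),
             st.2.add (PySem.List.pyGetD nums2 i 0, PySem.List.pyGetD nums2 j 0, PySem.List.pyGetD nums2 k 0)))
          st)
        = (fun st j =>
            ((PySem.List.pyRange (j + 1) n 1).foldl
              (fun s k => s.add (PySem.List.pyGetD nums1 i 0, PySem.List.pyGetD nums1 j 0, PySem.List.pyGetD nums1 k 0)) st.1,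
             (PySem.List.pyRange (j + 1) n 1).foldl
              (fun s k => s.add (PySem.List.pyGetD nums2 i 0, PySem.List.pyGetD nums2 j 0, PySem.List.pyGetD nums2 k 0)) st.2)) := by
      funext st j
      exact pv_foldl_prod_split (fun s k => s.add (PySem.List.pyGetD nums1 i 0, PySem.List.pyGetD nums1 j 0, PySem.List.pyGetD nums1 k 0)) (fun s k => s.add (PySem.List.pyGetD nums2 i 0, PySem.List.pyGetD nums2 j 0, PySem.List.pyGetD nums2 k 0)) _ st
    rw [hfun]
    exact pv_foldl_prod_split (fun s j => (PySem.List.pyRange (j + 1) n 1).foldl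
            (fun s k => s.add (PySem.List.pyGetD nums1 i 0, PySem.List.pyGetD nums1 j 0, PySem.List.pyGetD nums1 k 0)) s) (fun s j => (PySem.List.pyRange (j + 1) n 1).foldl
            (fun s k => s.add (PySem.List.pyGetD nums2 i 0, PySem.List.pyGetD nums2 j 0, PySem.List.pyGetD nums2 k 0)) s) _ st
  have hfun2 : (fun (st : PySem.Set (Int × Int × Int) × PySem.Set (Int × Int × Int)) (i : Int) =>
      (PySem.List.pyRange (i + 1) (n - 1) 1).foldl
        (fun st j =>
          (PySem.List.pyRange (j + 1) n 1).foldl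
            (fun st k =>
              (st.1.add (PySem.List.pyGetD nums1 i 0, PySem.List.pyGetD nums1 j 0, PySem.List.pyGetD nums1 k 0),
               st.2.add (PySem.List.pyGetD nums2 i 0, PySem.List.pyGetD nums2 j 0, PySem.List.pyGetD nums2 k 0)))
            st)
        st)
      = (fun st i =>
          ((PySem.List.pyRange (i + 1) (n - 1) 1).foldl
            (fun s j => (PySem.List.pyRange (j + 1) n 1).foldl
              (fun s k => s.add (PySem.List.pyGetD nums1 i 0, PySem.List.pyGetD nums1 j 0, PySem.List.pyGetD nums1 k 0)) s) st.1,
           (PySem.List.pyRange (i + 1) (n - 1) 1).foldl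
            (fun s j => (PySem.List.pyRange (j + 1) n 1).foldl
              (fun s k => s.add (PySem.List.pyGetD nums2 i 0, PySem.List.pyGetD nums2 j 0, PySem.List.pyGetD nums2 k 0)) s) st.2)) := by
    funext st i
    exact hmid i st
  rw [hfun2]
  exact pv_foldl_prod_split (fun (s : PySem.Set (Int × Int × Int)) i =>
          (PySem.List.pyRange (i + 1) (n - 1) 1).foldl
            (fun s j => (PySem.List.pyRange (j + 1) n 1).foldl
              (fun s k => s.add (PySem.List.pyGetD nums1 i 0, PySem.List.pyGetD nums1 j 0, PySem.List.pyGetD nums1 k 0)) s) s) (fun (s : PySem.Set (Int × Int × Int)) i =>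
          (PySem.List.pyRange (i + 1) (n - 1) 1).foldl
            (fun s j => (PySem.List.pyRange (j + 1) n 1).foldl
              (fun s k => s.add (PySem.List.pyGetD nums2 i 0, PySem.List.pyGetD nums2 j 0, PySem.List.pyGetD nums2 k 0)) s) s) _ _

theorem pv_nodupA (n : Int) (g : Int → Int → Int → (Int × Int × Int)) :
    ((PySem.List.pyRange 0 (n - 2) 1).foldl
      (fun (s : PySem.Set (Int × Int × Int)) i =>
        (PySem.List.pyRange (i + 1) (n - 1) 1).foldl
          (fun s j => (PySem.List.pyRange (j + 1) n 1).foldl (fun s k => s.add (g i j k)) s) s)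
      PySem.Set.empty).Nodup :=
  pv_nodup_foldl_gen _
    (fun s i hs => pv_nodup_foldl_gen _
      (fun s j hs => pv_nodup_foldl_gen _
        (fun s k hs => PySem.Set.nodup_add _ _ hs) _ s hs) _ s hs)
    _ _ (by simp [PySem.Set.empty])

-- ===== VERDICT (by name: the statement is the Claim_ definition above) =====
theorem goodTriplets_spec : Claim_equal_goodTriplets := by
  intro nums1 nums2 _ hpre
  unfold Spec_goodTriplets goodTriplets goodTriplets_alt
  simp only [pv_splitA]
  refine pv_len_inter_congr _ _ _ _ (pv_nodupA (nums1.length : Int) _)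
    (pv_nodup_pvTriples _) ?_ ?_
  · intro w
    obtain ⟨x, y, z⟩ := w
    refine (pv_memA (nums1.length : Int) _ (x, y, z)).trans
      ((pv_idx_iff_sublist nums1 (nums1.length : Int) (by simp) x y z).trans ?_)
    rw [show nums1.take ((nums1.length : Int)).toNat = nums1 by simp]
    exact (pv_mem_pvTriples nums1 (x, y, z)).symm
  · intro w
    obtain ⟨x, y, z⟩ := w
    have hslice : PySem.List.slice nums2 none (some (nums1.length : Int)) = nums2.take nums1.length :=
      PySem.List.slice_to_natCast nums2 nums1.length
    rcases hpre with hle | hlt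
    · refine (pv_memA (nums1.length : Int) _ (x, y, z)).trans
        ((pv_idx_iff_sublist nums2 (nums1.length : Int) (by exact_mod_cast hle) x y z).trans ?_)
      rw [show ((nums1.length : Int)).toNat = nums1.length by simp, hslice]
      exact (pv_mem_pvTriples _ (x, y, z)).symm
    · rw [pv_memA (nums1.length : Int) _ (x, y, z)]
      constructor
      · rintro ⟨i, hi, -⟩
        rw [PySem.List.mem_pyRange_one] at hi
        exfalso; omega
      · intro hmem
        exfalso
        have hsub := (pv_mem_pvTriples _ (x, y, z)).mp hmem
        have hlen := hsub.length_le
        rw [hslice] at hlen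
        simp [List.length_take] at hlen
        omega
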